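-- pv_equiv track=rewrite | github.com/oknappett/data_mining | assignment/assignment1.py | clean_port
-- ===== SOURCE A (Python) =====
-- def clean_port(port):
--     """
--     Function to clean ranks. Groups ranks together to eliminate messy data such as spelling
--
--     Parameters:
--     port (str): A string representing the name of a port.
--
--     Returns:
--     str: The standardized name of the port.
--
--     Example:
--         >>> clean_port('NewportMonmouthshire')
--         'newport'
--         >>> clean_port('Caernarvon')
--         'caernarvon'
--     """
--
--     # strip all characters that aren't letters
--     port = ''.join(a for a in str(port) if a.isalpha()).lower()
--
--     # switch case for string
--     match port:
--         case aberaeron if aberaeron in ['aberaeron', 'aberayron']: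
--             cleaned = 'aberaeron'
--
--         case aberdovey if aberdovey in ['aberdovey', 'aberdyfi']:
--             cleaned = 'aberdovey'
--
--         case aberystywth if aberystywth in ['aberystwith', 'aberystwyth', 'aberystywith', 'aberyswtih']:
--             cleaned = 'aberystywth'
--
--         case barry if barry in ['barry', 'barryport']:
--             cleaned = 'barry'
--
--         case britton if britton in ['britonferry', 'brittonferry']:
--             cleaned = 'brittonferry'
--
--         case caernarfon if caernarfon in ['caernarfon', 'caernarvon']:
--             cleaned = 'caernarvon'
--
--         case gloucester if gloucester in ['gloster', 'gloucester']:
--             cleaned = 'gloucester'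
--
--         case kingston if kingston in ['kingston', 'kingstown']:
--             cleaned = 'kingstown'
--
--         case llanelli if llanelli in ['llanelli', 'llanelly']:
--             cleaned = 'llanelli'
--
--         case middlesborough if middlesborough in ['middlesborough', 'middlesbro', 'middlesbrough']:
--             cleaned = 'middlesborough'
--
--         case newport if newport in ['newport', 'newportmon', 'newportmonmouthshire', 'newportpralt']:
--             cleaned = 'newport'
--
--         case newquay if newquay in ['newqua', 'newquay', 'newquayaberystwyth', 'newquaycardigan']:
--             cleaned = 'newquay'
--
--         case porthmadog if porthmadog in ['porthmadoc', 'porthmadog', 'portmadoc', 'portmadog']: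
--             cleaned = 'porthmadog'
--
--         case _:
--             cleaned = port
--
--     return cleaned
-- ===== SOURCE B (Python) =====
-- # Canonicalization via a character trie: the 35 variant spellings are inserted
-- # into a prefix tree once, and each call walks the cleaned name character by
-- # character instead of scanning membership lists.
--
-- _PAIRS = [
--     ('aberaeron', 'aberaeron'), ('aberayron', 'aberaeron'),
--     ('aberdovey', 'aberdovey'), ('aberdyfi', 'aberdovey'),
--     ('aberystwith', 'aberystywth'), ('aberystwyth', 'aberystywth'),
--     ('aberystywith', 'aberystywth'), ('aberyswtih', 'aberystywth'),
--     ('barry', 'barry'), ('barryport', 'barry'),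
--     ('britonferry', 'brittonferry'), ('brittonferry', 'brittonferry'),
--     ('caernarfon', 'caernarvon'), ('caernarvon', 'caernarvon'),
--     ('gloster', 'gloucester'), ('gloucester', 'gloucester'),
--     ('kingston', 'kingstown'), ('kingstown', 'kingstown'),
--     ('llanelli', 'llanelli'), ('llanelly', 'llanelli'),
--     ('middlesborough', 'middlesborough'), ('middlesbro', 'middlesborough'),
--     ('middlesbrough', 'middlesborough'),
--     ('newport', 'newport'), ('newportmon', 'newport'),
--     ('newportmonmouthshire', 'newport'), ('newportpralt', 'newport'),
--     ('newqua', 'newquay'), ('newquay', 'newquay'),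
--     ('newquayaberystwyth', 'newquay'), ('newquaycardigan', 'newquay'),
--     ('porthmadoc', 'porthmadog'), ('porthmadog', 'porthmadog'),
--     ('portmadoc', 'porthmadog'), ('portmadog', 'porthmadog'),
-- ]
--
--
-- def _build_trie(pairs):
--     root = {}
--     for key, canon in pairs:
--         node = root
--         for ch in key:
--             node = node.setdefault(ch, {})
--         node['$'] = canon  # terminal marker holds the canonical name
--     return root
--
--
-- _TRIE = _build_trie(_PAIRS)
--
--
-- def clean_port(port):
--     cleaned = ''.join(a for a in str(port) if a.isalpha()).lower()
--     node = _TRIE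
--     for ch in cleaned:
--         node = node.get(ch)
--         if node is None:
--             return cleaned
--     return node.get('$', cleaned)
-- ===== Notes on version B (the rewrite author's own statement) =====
-- stated objective: alternative
-- what changed: The 13-branch match/case chain of list-membership tests is replaced by a character trie (prefix tree) built once from the 35 variant spellings; each call walks the cleaned name character by character and reads the canonical name at the terminal node, falling back to the cleaned name when the walk fails.
import Mathlib
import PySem

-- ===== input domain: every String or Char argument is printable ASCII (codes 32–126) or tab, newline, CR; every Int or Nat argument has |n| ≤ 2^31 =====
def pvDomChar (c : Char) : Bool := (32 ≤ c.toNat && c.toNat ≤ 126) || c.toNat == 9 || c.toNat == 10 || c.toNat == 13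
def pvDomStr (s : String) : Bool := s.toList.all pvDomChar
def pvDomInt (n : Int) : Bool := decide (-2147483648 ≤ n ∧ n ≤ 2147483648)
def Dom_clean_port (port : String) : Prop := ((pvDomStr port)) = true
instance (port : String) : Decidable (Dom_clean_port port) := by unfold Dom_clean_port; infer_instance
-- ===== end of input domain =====

-- B replaces A's 13-branch match/case chain of membership tests by a character trie
-- built once from the 35 variant spellings and walked per character (objective: alternative).

-- ===== PORT A =====
-- match/case chain: each case is a capture pattern with an 'in <list>' guard, i.e. a sequential membership chain
def clean_port (port : String) : String :=
  let p := String.ofList (PySem.Chars.lower ((port.toList).filter PySem.Chars.isalpha))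
  if p ∈ ["aberaeron", "aberayron"] then "aberaeron"
  else if p ∈ ["aberdovey", "aberdyfi"] then "aberdovey"
  else if p ∈ ["aberystwith", "aberystwyth", "aberystywith", "aberyswtih"] then "aberystywth"
  else if p ∈ ["barry", "barryport"] then "barry"
  else if p ∈ ["britonferry", "brittonferry"] then "brittonferry"
  else if p ∈ ["caernarfon", "caernarvon"] then "caernarvon"
  else if p ∈ ["gloster", "gloucester"] then "gloucester"
  else if p ∈ ["kingston", "kingstown"] then "kingstown"
  else if p ∈ ["llanelli", "llanelly"] then "llanelli"
  else if p ∈ ["middlesborough", "middlesbro", "middlesbrough"] then "middlesborough"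
  else if p ∈ ["newport", "newportmon", "newportmonmouthshire", "newportpralt"] then "newport"
  else if p ∈ ["newqua", "newquay", "newquayaberystwyth", "newquaycardigan"] then "newquay"
  else if p ∈ ["porthmadoc", "porthmadog", "portmadoc", "portmadog"] then "porthmadog"
  else p

-- ===== PORT B =====
-- Source B's trie of nested dicts, in the standard first-child/next-sibling encoding
-- (a node's dict of children becomes a sibling chain, since a dict-valued nested
-- inductive is not allowed here); the '$' terminal marker of Source B becomes the
-- node's Option String field. Exact on all inputs.
inductive PvTrie where
  | nil : PvTrie
  | node : Char → Option String → PvTrie → PvTrie → PvTrie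
deriving DecidableEq, Repr

-- the sibling-chain step of one insertion: find/create the node for character c,
-- then apply rec (the insertion of the rest of the key) to its child
def pvInsertGo (c : Char) (cs : List Char) (s : String) (rec : PvTrie → PvTrie) : PvTrie → PvTrie
  | .nil =>
      if cs = [] then .node c (some s) .nil .nil
      else .node c none (rec .nil) .nil
  | .node c0 v child sib =>
      if c0 = c then
        (if cs = [] then .node c0 (some s) child sib
         else .node c0 v (rec child) sib)
      else .node c0 v child (pvInsertGo c cs s rec sib)

-- one insertion of Source B's inner loop: walk/extend the chain for key, set the terminal value
def pvInsert (key : List Char) (s : String) (t : PvTrie) : PvTrie :=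
  match key with
  | [] => t
  | c :: cs => pvInsertGo c cs s (fun u => pvInsert cs s u) t

-- _PAIRS of Source B
def pvPairs : List (String × String) :=
  [("aberaeron", "aberaeron"), ("aberayron", "aberaeron"),
   ("aberdovey", "aberdovey"), ("aberdyfi", "aberdovey"),
   ("aberystwith", "aberystywth"), ("aberystwyth", "aberystywth"),
   ("aberystywith", "aberystywth"), ("aberyswtih", "aberystywth"),
   ("barry", "barry"), ("barryport", "barry"),
   ("britonferry", "brittonferry"), ("brittonferry", "brittonferry"),
   ("caernarfon", "caernarvon"), ("caernarvon", "caernarvon"),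
   ("gloster", "gloucester"), ("gloucester", "gloucester"),
   ("kingston", "kingstown"), ("kingstown", "kingstown"),
   ("llanelli", "llanelli"), ("llanelly", "llanelli"),
   ("middlesborough", "middlesborough"), ("middlesbro", "middlesborough"),
   ("middlesbrough", "middlesborough"),
   ("newport", "newport"), ("newportmon", "newport"),
   ("newportmonmouthshire", "newport"), ("newportpralt", "newport"),
   ("newqua", "newquay"), ("newquay", "newquay"),
   ("newquayaberystwyth", "newquay"), ("newquaycardigan", "newquay"),
   ("porthmadoc", "porthmadog"), ("porthmadog", "porthmadog"),
   ("portmadoc", "porthmadog"), ("portmadog", "porthmadog")]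

-- _TRIE = _build_trie(_PAIRS)
def pvTrie : PvTrie := pvPairs.foldl (fun t kv => pvInsert kv.1.toList kv.2 t) .nil

-- the per-call walk of Source B: follow one child link per character, a missing child is
-- the early 'return cleaned'; at the end read the terminal value ('$')
def pvLookup : PvTrie → List Char → Option String
  | .nil, _ => none
  | .node c0 v child sib, cs =>
    match cs with
    | [] => none
    | c :: cs' => if c0 = c then (if cs' = [] then v else pvLookup child cs') else pvLookup sib cs

def clean_port_alt (port : String) : String :=
  let cs := PySem.Chars.lower ((port.toList).filter PySem.Chars.isalpha)
  (pvLookup pvTrie cs).getD (String.ofList cs)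

-- ===== PRECONDITION & SPEC =====
def Spec_clean_port (port : String) (out : String) : Prop := out = clean_port_alt port
instance (port : String) (out : String) : Decidable (Spec_clean_port port out) := by unfold Spec_clean_port; infer_instance

-- ===== CLAIM (what is proved, stated in full; the proofs are below) =====
def Claim_equal_clean_port : Prop := ∀ (port : String), Dom_clean_port port → Spec_clean_port port (clean_port port)

-- ===== LEMMAS AND PROOFS =====

-- all keys stored in a trie (char-list form)
def pvKeysOf : PvTrie → List (List Char)
  | .nil => []
  | .node c0 v child sib =>
      (match v with | some _ => [[c0]] | none => []) ++
      (pvKeysOf child).map (c0 :: ·) ++ pvKeysOf sib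

-- a successful lookup can only happen at a stored key
theorem pvLookup_mem : ∀ (t : PvTrie) (cs : List Char) (v : String),
    pvLookup t cs = some v → cs ∈ pvKeysOf t := by
  intro t
  induction t with
  | nil => intro cs v h; simp [pvLookup] at h
  | node c0 val child sib ihc ihs =>
    intro cs v h
    cases cs with
    | nil => simp [pvLookup] at h
    | cons c cs' =>
      simp only [pvLookup] at h
      by_cases hc : c0 = c
      · subst hc
        rw [if_pos rfl] at h
        cases cs' with
        | nil =>
          rw [if_pos rfl] at h
          subst h
          simp [pvKeysOf]
        | cons d ds =>
          rw [if_neg (List.cons_ne_nil d ds)] at h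
          have hm := ihc _ _ h
          simp only [pvKeysOf, List.mem_append]
          exact Or.inl (Or.inr (List.mem_map_of_mem hm))
      · rw [if_neg hc] at h
        have hm := ihs _ _ h
        simp only [pvKeysOf, List.mem_append]
        exact Or.inr hm

def pvAllKeys : List String := ["aberaeron", "aberayron", "aberdovey", "aberdyfi", "aberystwith", "aberystwyth", "aberystywith", "aberyswtih", "barry", "barryport", "britonferry", "brittonferry", "caernarfon", "caernarvon", "gloster", "gloucester", "kingston", "kingstown", "llanelli", "llanelly", "middlesborough", "middlesbro", "middlesbrough", "newport", "newportmon", "newportmonmouthshire", "newportpralt", "newqua", "newquay", "newquayaberystwyth", "newquaycardigan", "porthmadoc", "porthmadog", "portmadoc", "portmadog"]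

def pvAllKeysChars : List (List Char) := pvAllKeys.map String.toList

set_option maxRecDepth 16384 in
theorem pvTrie_keys : pvKeysOf pvTrie = pvAllKeysChars := by decide

-- the membership chain agrees with the trie walk on EVERY cleaned character list
set_option maxRecDepth 16384 in
theorem pvChain_eq_lookup (cs : List Char) :
    (let p := String.ofList cs
     if p ∈ ["aberaeron", "aberayron"] then "aberaeron" else if p ∈ ["aberdovey", "aberdyfi"] then "aberdovey" else if p ∈ ["aberystwith", "aberystwyth", "aberystywith", "aberyswtih"] then "aberystywth" else if p ∈ ["barry", "barryport"] then "barry" else if p ∈ ["britonferry", "brittonferry"] then "brittonferry" else if p ∈ ["caernarfon", "caernarvon"] then "caernarvon" else if p ∈ ["gloster", "gloucester"] then "gloucester" else if p ∈ ["kingston", "kingstown"] then "kingstown" else if p ∈ ["llanelli", "llanelly"] then "llanelli" else if p ∈ ["middlesborough", "middlesbro", "middlesbrough"] then "middlesborough" else if p ∈ ["newport", "newportmon", "newportmonmouthshire", "newportpralt"] then "newport" else if p ∈ ["newqua", "newquay", "newquayaberystwyth", "newquaycardigan"] then "newquay" else if p ∈ ["porthmadoc", "porthmadog", "portmadoc",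 "portmadog"] then "porthmadog" else p)
    = (pvLookup pvTrie cs).getD (String.ofList cs) := by
  by_cases h : cs ∈ pvAllKeysChars
  · simp only [pvAllKeysChars, pvAllKeys, List.map] at h
    fin_cases h <;> decide
  · have hs : String.ofList cs ∉ pvAllKeys := by
      intro hmem
      apply h
      have : (String.ofList cs).toList ∈ pvAllKeys.map String.toList :=
        List.mem_map_of_mem hmem
      simpa [pvAllKeysChars, String.toList_ofList] using this
    have hnone : pvLookup pvTrie cs = none := by
      cases hl : pvLookup pvTrie cs with
      | none => rfl
      | some v =>
        exfalso
        have hk : cs ∈ pvKeysOf pvTrie := pvLookup_mem _ _ _ hl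
        rw [pvTrie_keys] at hk
        simp only [pvAllKeysChars] at hk
        obtain ⟨p, hp, hpe⟩ := List.mem_map.mp hk
        exact hs (by rw [← hpe, String.ofList_toList]; exact hp)
    rw [hnone]
    simp only [Option.getD_none]
    simp only [pvAllKeys, List.mem_cons, not_or, List.not_mem_nil] at hs
    obtain ⟨h1, h2, h3, h4, h5, h6, h7, h8, h9, h10, h11, h12, h13, h14, h15, h16, h17, h18, h19, h20, h21, h22, h23, h24, h25, h26, h27, h28, h29, h30, h31, h32, h33, h34, h35⟩ := hs
    simp [h1, h2, h3, h4, h5, h6, h7, h8, h9, h10, h11, h12, h13, h14, h15, h16, h17, h18, h19, h20, h21, h22, h23, h24, h25, h26, h27, h28, h29, h30, h31, h32, h33, h34, h35]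

-- ===== VERDICT (by name: the statement is the Claim_ definition above) =====
theorem clean_port_spec : Claim_equal_clean_port := by
  intro port _
  unfold Spec_clean_port clean_port clean_port_alt
  exact pvChain_eq_lookup _
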